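-- pv_equiv track=rewrite | github.com/ztjona/codeVita_S9_Z2 | (B) Binary Equivalent/binary.py | countingCombinations
-- ===== SOURCE A (Python) =====
-- from itertools import combinations
--
-- def countingCombinations(vals, maxBits):
--     ''' returns the number of combinations that fullfil the binary equivalence
--     ############################################### '''
--
--     nSolutions = 0
--
--     # D: for a given vector x returns true when the nmber of ones is equal the number of zeros!
--     def validateEquivalence(x): return sum(x)*2 == maxBits*len(x)
--
--     for i in range(1, len(vals) + 1):
--         for comb in combinations(vals, i):
--             if validateEquivalence(comb):
--                 nSolutions += 1
--
--     return nSolutions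
-- ===== SOURCE B (Python) =====
-- def countingCombinations(vals, maxBits):
--     # Subset-sum counting DP on shifted weights 2*v - maxBits: a combination is
--     # "binary equivalent" iff its shifted weights sum to 0; subtract the empty set.
--     counts = {0: 1}
--     for v in vals:
--         w = 2 * v - maxBits
--         new = dict(counts)
--         for s, c in counts.items():
--             new[s + w] = new.get(s + w, 0) + c
--         counts = new
--     return counts.get(0, 0) - 1
-- ===== Notes on version B (the rewrite author's own statement) =====
-- stated objective: faster
-- what changed: Replaced explicit enumeration of all 2^n combinations with a subset-sum counting DP over a dictionary of shifted weights (2*v - maxBits), returning the count at sum 0 minus the empty set.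
import Mathlib
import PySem

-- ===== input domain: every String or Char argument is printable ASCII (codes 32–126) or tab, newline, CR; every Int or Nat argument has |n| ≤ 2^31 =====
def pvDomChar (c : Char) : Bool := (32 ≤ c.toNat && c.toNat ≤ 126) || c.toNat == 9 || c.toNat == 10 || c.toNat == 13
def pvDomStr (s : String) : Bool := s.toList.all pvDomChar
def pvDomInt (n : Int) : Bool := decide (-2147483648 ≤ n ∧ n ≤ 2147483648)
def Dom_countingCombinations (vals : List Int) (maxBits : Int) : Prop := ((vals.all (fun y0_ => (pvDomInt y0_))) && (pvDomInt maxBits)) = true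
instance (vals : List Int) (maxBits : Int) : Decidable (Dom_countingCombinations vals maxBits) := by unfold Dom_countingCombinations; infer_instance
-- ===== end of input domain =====

-- B replaces A's enumeration of every combination with a subset-sum counting DP
-- on the shifted weights 2*v - maxBits (objective: faster, asymptotic).

-- ===== PORT A =====
-- itertools.combinations(vals, r), ported by hand: tuples of elements at strictly
-- increasing positions, in itertools' order; exact for the r ≥ 0 produced by range(1, len+1).
def combosA : List Int → Nat → List (List Int)
  | _, 0 => [[]]
  | [], _ + 1 => []
  | x :: xs, n + 1 => (combosA xs n).map (x :: ·) ++ combosA xs (n + 1)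

def countingCombinations (vals : List Int) (maxBits : Int) : Int :=
  (PySem.List.pyRange 1 ((vals.length : Int) + 1) 1).foldl
    (fun nSolutions i =>
      (combosA vals i.toNat).foldl
        (fun acc comb =>
          if comb.sum * 2 == maxBits * (comb.length : Int) then acc + 1 else acc)
        nSolutions)
    0

-- ===== PORT B =====
-- counts maps a reachable sum of shifted weights to the number of combinations
-- reaching it; 'new = dict(counts)' is the starting value of the inner fold
-- (dicts are immutable values here, so the copy is the dict itself).
def countingCombinations_alt (vals : List Int) (maxBits : Int) : Int :=
  let counts := vals.foldl
    (fun counts v =>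
      let w := 2 * v - maxBits
      counts.items.foldl
        (fun nw sc => nw.insert (sc.1 + w) (nw.getD (sc.1 + w) 0 + sc.2))
        counts)
    ((PySem.Dict.empty : PySem.Dict Int Int).insert 0 1)  -- {0: 1}
  counts.getD 0 0 - 1

-- ===== PRECONDITION & SPEC =====
def Spec_countingCombinations (vals : List Int) (maxBits : Int) (out : Int) : Prop := out = countingCombinations_alt vals maxBits
instance (vals : List Int) (maxBits : Int) (out : Int) : Decidable (Spec_countingCombinations vals maxBits out) := by unfold Spec_countingCombinations; infer_instance

-- ===== CLAIM (what is proved, stated in full; the proofs are below) =====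
def Claim_equal_countingCombinations : Prop := ∀ (vals : List Int) (maxBits : Int), Dom_countingCombinations vals maxBits → Spec_countingCombinations vals maxBits (countingCombinations vals maxBits)

-- ===== LEMMAS AND PROOFS =====

-- Number of sublists (= combinations, all lengths including empty) satisfying p.
def subCnt (p : List Int → Bool) : List Int → Int
  | [] => if p [] then 1 else 0
  | x :: xs => subCnt p xs + subCnt (fun t => p (x :: t)) xs

theorem subCnt_congr (p q : List Int → Bool) (h : ∀ t, p t = q t) :
    ∀ l, subCnt p l = subCnt q l := by
  intro l
  induction l generalizing p q with
  | nil => simp [subCnt, h]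
  | cons x xs ih => simp [subCnt, ih p q h, ih _ _ (fun t => h (x :: t))]

theorem subCnt_concat (l : List Int) (v : Int) :
    ∀ p, subCnt p (l ++ [v]) = subCnt p l + subCnt (fun t => p (t ++ [v])) l := by
  induction l with
  | nil => intro p; simp [subCnt]
  | cons x xs ih =>
    intro p
    simp only [List.cons_append, subCnt, ih]
    ring

-- ---- A side ----

theorem combosA_nil_of_lt : ∀ (l : List Int) (k : Nat), l.length < k → combosA l k = [] := by
  intro l
  induction l with
  | nil => intro k hk; cases k with
    | zero => omega
    | succ n => rfl
  | cons x xs ih =>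
    intro k hk
    cases k with
    | zero => simp at hk
    | succ n =>
      simp only [combosA, ih n (by simpa using Nat.lt_of_succ_lt_succ hk),
        ih (n+1) (by simp at hk; omega), List.map_nil, List.append_nil]

theorem sum_map_shift (f : Nat → Int) (n : Nat) :
    ((List.range (n + 1)).map f).sum = f 0 + ((List.range n).map (fun i => f (i + 1))).sum := by
  rw [List.range_succ_eq_map]
  simp only [List.map_cons, List.sum_cons, List.map_map]
  rfl

theorem sum_map_split (g h : Nat → Int) (L : List Nat) :
    (L.map (fun i => g i + h i)).sum = (L.map g).sum + (L.map h).sum := by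
  induction L with
  | nil => simp
  | cons a L ihL => simp only [List.map_cons, List.sum_cons, ihL]; ring

theorem gsumA (l : List Int) :
    ∀ p, ((List.range (l.length + 1)).map
        (fun i => ((combosA l i).countP p : Int))).sum = subCnt p l := by
  induction l with
  | nil =>
    intro p
    by_cases h : p [] <;>
      simp [combosA, subCnt, h]
  | cons x xs ih =>
    intro p
    rw [List.length_cons, sum_map_shift]
    have h0 : ((combosA (x :: xs) 0).countP p : Int) = if p [] then 1 else 0 := by
      by_cases h : p [] <;> simp [combosA, h]
    have hterm : ∀ i : Nat, ((combosA (x :: xs) (i + 1)).countP p : Int)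
        = ((combosA xs i).countP (fun t => p (x :: t)) : Int)
          + ((combosA xs (i + 1)).countP p : Int) := by
      intro i
      simp only [combosA, List.countP_append, List.countP_map, Nat.cast_add]
      rfl
    simp only [hterm]
    rw [sum_map_split]
    have h00 : ((combosA xs 0).countP p : Int) = if p [] then 1 else 0 := by
      by_cases h : p [] <;> simp [combosA, h]
    have hfull : ((List.range (xs.length + 1 + 1)).map
        (fun i => ((combosA xs i).countP p : Int))).sum = subCnt p xs := by
      rw [List.range_succ]
      simp [combosA_nil_of_lt xs (xs.length + 1) (by omega), ih p]
    have hsh := sum_map_shift (fun i => ((combosA xs i).countP p : Int)) (xs.length + 1)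
    rw [hfull, h00] at hsh
    rw [ih (fun t => p (x :: t))]
    simp only [subCnt]
    rw [h0]
    linarith

theorem a_closed (vals : List Int) (maxBits : Int) :
    countingCombinations vals maxBits
      = subCnt (fun t => t.sum * 2 == maxBits * (t.length : Int)) vals - 1 := by
  unfold countingCombinations
  simp only [PySem.List.foldl_if_add_one]
  rw [PySem.List.foldl_add (g := fun i : Int =>
      (((combosA vals i.toNat).countP
        (fun comb => comb.sum * 2 == maxBits * (comb.length : Int))) : Int))]
  rw [PySem.List.pyRange_one]
  have htn : (((vals.length : Int) + 1) - 1).toNat = vals.length := by omega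
  rw [htn, List.map_map]
  have hcast : ∀ k : Nat, ((1 : Int) + (k : Int)).toNat = k + 1 := by intro k; omega
  have hsh := sum_map_shift (fun i => (((combosA vals i).countP
      (fun comb => comb.sum * 2 == maxBits * (comb.length : Int))) : Int)) vals.length
  rw [gsumA] at hsh
  have h0 : ((combosA vals 0).countP
      (fun comb => comb.sum * 2 == maxBits * (comb.length : Int)) : Int) = 1 := by
    simp [combosA]
  rw [h0] at hsh
  have hFG : (List.map
        ((fun i : Int => ((List.countP (fun comb => comb.sum * 2 == maxBits * (comb.length : Int))
            (combosA vals i.toNat)) : Int)) ∘ fun k : Nat => 1 + (k : Int))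
        (List.range vals.length)).sum
      = (List.map (fun i : Nat => ((List.countP (fun comb => comb.sum * 2 == maxBits * (comb.length : Int))
            (combosA vals (i + 1))) : Int))
        (List.range vals.length)).sum := by
    congr 1
    apply List.map_congr_left
    intro k _
    simp [Function.comp, hcast k]
  rw [hFG]
  linarith


-- ---- B side ----

def lkpF (L : List (Int × Int)) (k : Int) : Int :=
  ((L.find? (fun p => p.1 == k)).map Prod.snd).getD 0

theorem lkpF_items (d : PySem.Dict Int Int) (hnd : d.keys.Nodup) (k : Int) :
    lkpF d.items k = d.getD k 0 := by
  unfold lkpF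
  cases hf : d.items.find? (fun p => p.1 == k) with
  | none =>
    have hnc : d.contains k = false := by
      rw [PySem.Dict.contains_eq_decide_mem_keys]
      simp only [decide_eq_false_iff_not]
      intro hk
      simp only [PySem.Dict.keys, List.mem_map] at hk
      obtain ⟨p, hp, hpk⟩ := hk
      have := List.find?_eq_none.mp hf p hp
      simp [hpk] at this
    rw [PySem.Dict.getD_of_not_contains _ _ hnc]
    simp
  | some p =>
    have hp1 : p.1 = k := by simpa using List.find?_some hf
    have hmem : (k, p.2) ∈ d.items := by
      rw [← hp1]
      exact List.mem_of_find?_eq_some hf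
    rw [PySem.Dict.getD_of_mem_items _ hmem hnd]
    simp

theorem fold_ins (w : Int) : ∀ (L : List (Int × Int)) (d : PySem.Dict Int Int),
    (L.map Prod.fst).Nodup → ∀ t,
    (L.foldl (fun nw sc => nw.insert (sc.1 + w) (nw.getD (sc.1 + w) 0 + sc.2)) d).getD t 0
      = d.getD t 0 + lkpF L (t - w) := by
  intro L
  induction L with
  | nil => intro d _ t; simp [lkpF]
  | cons sc T ih =>
    intro d hnd t
    simp only [List.map_cons, List.nodup_cons] at hnd
    simp only [List.foldl_cons]
    rw [ih _ hnd.2 t]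
    by_cases hk : sc.1 = t - w
    · have ht : t = sc.1 + w := by omega
      have hlk0 : lkpF T (t - w) = 0 := by
        unfold lkpF
        rw [List.find?_eq_none.mpr]
        · rfl
        · intro p hp
          simp only [beq_iff_eq]
          intro hpk
          exact hnd.1 (by rw [show sc.1 = p.1 by rw [hpk, hk]]; exact List.mem_map_of_mem hp)
      have hlk : lkpF (sc :: T) (t - w) = sc.2 := by
        unfold lkpF
        rw [List.find?_cons_of_pos (by simp [hk])]
        rfl
      rw [hlk0, hlk, ht, PySem.Dict.getD_insert, if_pos rfl]
      omega
    · have ht : t ≠ sc.1 + w := by omega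
      have hlk : lkpF (sc :: T) (t - w) = lkpF T (t - w) := by
        unfold lkpF
        rw [List.find?_cons_of_neg (by simp; omega)]
      rw [hlk, PySem.Dict.getD_insert, if_neg ht]

def wsum (m : Int) (t : List Int) : Int := 2 * t.sum - m * (t.length : Int)

def GoodD (m : Int) (d : PySem.Dict Int Int) (l : List Int) : Prop :=
  d.keys.Nodup ∧ ∀ s, d.getD s 0 = subCnt (fun t => wsum m t == s) l

theorem good_step (m : Int) (d : PySem.Dict Int Int) (l : List Int) (v : Int)
    (h : GoodD m d l) :
    GoodD m (d.items.foldl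
        (fun nw sc => nw.insert (sc.1 + (2 * v - m)) (nw.getD (sc.1 + (2 * v - m)) 0 + sc.2)) d)
      (l ++ [v]) := by
  obtain ⟨hnd, hval⟩ := h
  constructor
  · exact PySem.Dict.nodup_keys_foldl_insert_key d.items (fun sc => sc.1 + (2 * v - m))
      (fun nw sc => nw.getD (sc.1 + (2 * v - m)) 0 + sc.2) d hnd
  · intro s
    have hknd : (d.items.map Prod.fst).Nodup := by
      simpa [PySem.Dict.keys] using hnd
    rw [fold_ins (2 * v - m) d.items d hknd s, lkpF_items d hnd, hval, hval, subCnt_concat]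
    congr 1
    apply subCnt_congr
    intro t
    have hws : wsum m (t ++ [v]) = wsum m t + (2 * v - m) := by
      simp [wsum]
      ring
    rw [hws]
    by_cases hh : wsum m t = s - (2 * v - m)
    · simp [hh]
    · have h2 : ¬ (wsum m t + (2 * v - m) = s) := by omega
      simp [hh, h2]

theorem good_fold (m : Int) : ∀ (r l : List Int) (d : PySem.Dict Int Int),
    GoodD m d l →
    GoodD m (r.foldl (fun counts v =>
        counts.items.foldl
          (fun nw sc => nw.insert (sc.1 + (2 * v - m)) (nw.getD (sc.1 + (2 * v - m)) 0 + sc.2))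
          counts) d)
      (l ++ r) := by
  intro r
  induction r with
  | nil => intro l d h; simpa using h
  | cons v r ih =>
    intro l d h
    simp only [List.foldl_cons]
    have := ih (l ++ [v]) _ (good_step m d l v h)
    simpa [List.append_assoc] using this

theorem b_closed (vals : List Int) (maxBits : Int) :
    countingCombinations_alt vals maxBits
      = subCnt (fun t => wsum maxBits t == 0) vals - 1 := by
  have hbase : GoodD maxBits ((PySem.Dict.empty : PySem.Dict Int Int).insert 0 1) [] := by
    constructor
    · exact PySem.Dict.nodup_keys_insert _ _ _ PySem.Dict.nodup_keys_empty
    · intro s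
      rw [PySem.Dict.getD_insert]
      by_cases hs : s = 0
      · simp [hs, subCnt, wsum]
      · rw [if_neg hs, PySem.Dict.getD_empty]
        have : ((0 : Int) == s) = false := by simp [Ne.symm hs]
        simp [subCnt, wsum, this]
  have hg := good_fold maxBits vals [] _ hbase
  simp only [List.nil_append] at hg
  show (vals.foldl (fun counts v => counts.items.foldl
      (fun nw sc => nw.insert (sc.1 + (2 * v - maxBits)) (nw.getD (sc.1 + (2 * v - maxBits)) 0 + sc.2))
      counts) ((PySem.Dict.empty : PySem.Dict Int Int).insert 0 1)).getD 0 0 - 1 = _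
  rw [hg.2 0]

-- ===== VERDICT (by name: the statement is the Claim_ definition above) =====
theorem countingCombinations_spec : Claim_equal_countingCombinations := by
  intro vals maxBits _
  unfold Spec_countingCombinations
  rw [a_closed, b_closed]
  congr 1
  apply subCnt_congr
  intro t
  have : (t.sum * 2 = maxBits * (t.length : Int)) ↔ (wsum maxBits t = 0) := by
    unfold wsum; omega
  by_cases h : t.sum * 2 = maxBits * (t.length : Int)
  · simp [h, this.mp h]
  · simp [h]
    exact fun hh => h (this.mpr hh)
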